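-- pv_equiv track=rewrite | github.com/RahatKarim1795/tutorial_tanjil | winter semster CMPUT175/ass2.py | update_sales
-- ===== SOURCE A (Python) =====
-- def update_sales(total_sales, return_file):
--
--     returns = {}
--
--     for line in return_file[1:]:
--         split_line = line.strip().split(",")
--         transaction_id = split_line[0]
--         returns[transaction_id] = True
--
--     updated_sales = {}
--
--     for transaction_id, transaction_details in total_sales.items():
--         if transaction_id not in returns:
--             updated_sales[transaction_id] = transaction_details
--
--
--     return updated_sales
-- ===== SOURCE B (Python) =====
-- def update_sales(total_sales, return_file):
--     updated = dict(total_sales)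
--     for line in return_file[1:]:
--         transaction_id = line.strip().split(",")[0]
--         updated.pop(transaction_id, None)
--     return updated
-- ===== Notes on version B (the rewrite author's own statement) =====
-- stated objective: simpler
-- what changed: B copies the sales dict and deletes each returned transaction id via pop(..., None), instead of first building a returns table and then filtering the sales into a fresh dict.
import Mathlib
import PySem

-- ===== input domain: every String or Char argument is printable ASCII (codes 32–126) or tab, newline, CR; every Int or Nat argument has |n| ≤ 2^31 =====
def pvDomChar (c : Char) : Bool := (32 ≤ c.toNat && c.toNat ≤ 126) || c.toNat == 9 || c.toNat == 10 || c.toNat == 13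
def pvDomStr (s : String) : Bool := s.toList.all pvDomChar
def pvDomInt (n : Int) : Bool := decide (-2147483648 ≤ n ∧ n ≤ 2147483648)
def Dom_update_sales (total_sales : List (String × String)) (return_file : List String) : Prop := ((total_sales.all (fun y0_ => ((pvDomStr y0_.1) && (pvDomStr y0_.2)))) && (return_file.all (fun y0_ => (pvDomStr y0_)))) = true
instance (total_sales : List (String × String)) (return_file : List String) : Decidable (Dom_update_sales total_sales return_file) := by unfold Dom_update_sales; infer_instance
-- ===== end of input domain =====

-- B copies the sales dict and deletes each returned transaction id (pop with default),
-- instead of building a returns table and filtering the sales into a fresh dict: simpler decomposition, same cost.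

-- line.strip().split(",")[0]; split with the nonempty separator "," always yields a
-- nonempty list, so the [0] access never raises and is exactly the head.
def pvTid (line : String) : String :=
  ((PySem.Str.split? (PySem.Str.strip line) ",").getD []).headD ""

-- ===== PORT A =====
def update_sales (total_sales : List (String × String)) (return_file : List String) : List (String × String) :=
  let returns : PySem.Dict String Bool :=
    (PySem.List.slice return_file (some 1)).foldl
      (fun d line => d.insert (pvTid line) true) PySem.Dict.empty
  let updated_sales : PySem.Dict String String :=
    total_sales.foldl
      (fun d p => if returns.contains p.1 then d else d.insert p.1 p.2) PySem.Dict.empty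
  updated_sales.items

-- ===== PORT B =====
def update_sales_alt (total_sales : List (String × String)) (return_file : List String) : List (String × String) :=
  let updated : PySem.Dict String String := PySem.Dict.ofList total_sales
  let final : PySem.Dict String String :=
    (PySem.List.slice return_file (some 1)).foldl
      (fun d line =>
        -- updated.pop(transaction_id, None): remove the entry if present, else leave d unchanged
        match d.pop? (pvTid line) with
        | some (_, d') => d'
        | none => d) updated
  final.items

-- ===== PRECONDITION & SPEC =====
def Spec_update_sales (total_sales : List (String × String)) (return_file : List String) (out : List (String × String)) : Prop := out = update_sales_alt total_sales return_file
instance (total_sales : List (String × String)) (return_file : List String) (out : List (String × String)) : Decidable (Spec_update_sales total_sales return_file out) := by unfold Spec_update_sales; infer_instance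

-- ===== CLAIM (what is proved, stated in full; the proofs are below) =====
def Claim_equal_update_sales : Prop := ∀ (total_sales : List (String × String)) (return_file : List String), Dom_update_sales total_sales return_file → Spec_update_sales total_sales return_file (update_sales total_sales return_file)

-- ===== LEMMAS AND PROOFS =====

-- pop with default is erase (erase is the identity when the key is absent)
theorem pv_pop_step (d : PySem.Dict String String) (k : String) :
    (match d.pop? k with | some (_, d') => d' | none => d) = d.erase k := by
  unfold PySem.Dict.pop? PySem.Dict.get?
  cases h : d.items.find? (fun p => p.1 == k) with
  | none =>
    have hid : d.items.filter (fun p => !(p.1 == k)) = d.items := by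
      apply List.filter_eq_self.mpr
      intro p hp
      have := List.find?_eq_none.mp h p hp
      simpa using this
    simp only [Option.map_none]
    apply PySem.Dict.ext
    simp [PySem.Dict.erase, hid]
  | some v => simp

-- the returns table contains exactly the parsed ids
theorem pv_contains_returns (l : List String) (k : String) :
    ((l.foldl (fun d line => d.insert (pvTid line) true) (PySem.Dict.empty : PySem.Dict String Bool)).contains k)
      = decide (k ∈ l.map pvTid) := by
  have hk := PySem.Dict.keys_foldl_insert_key l pvTid (fun _ _ => true)
      (PySem.Dict.empty : PySem.Dict String Bool)
  have hmem : ((l.foldl (fun d line => d.insert (pvTid line) true)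
      (PySem.Dict.empty : PySem.Dict String Bool)).contains k) = true ↔ k ∈ l.map pvTid := by
    rw [PySem.Dict.contains_iff_mem_keys, hk]
    simp [PySem.Dict.keys_empty, PySem.Set.update_nil_left, PySem.Set.mem_ofList]
  by_cases hm : k ∈ l.map pvTid
  · simp [hmem.mpr hm, hm]
  · simp only [hm, decide_false]
    rcases Bool.eq_false_or_eq_true (((l.foldl (fun d line => d.insert (pvTid line) true)
        (PySem.Dict.empty : PySem.Dict String Bool)).contains k)) with h | h
    · exact absurd (hmem.mp h) hm
    · exact h

-- a fold that skips P-keys is the fold of the filtered list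
theorem pv_foldl_if_filter (P : String → Bool) (L : List (String × String)) (d : PySem.Dict String String) :
    L.foldl (fun d p => if P p.1 then d else d.insert p.1 p.2) d
      = (L.filter (fun p => !P p.1)).foldl (fun d p => d.insert p.1 p.2) d := by
  induction L generalizing d with
  | nil => rfl
  | cons p L ih =>
    by_cases h : P p.1
    · simp [h, ih]
    · simp [h, ih]

-- erasing a list of keys one by one filters the items
theorem pv_foldl_erase_items (ids : List String) (d : PySem.Dict String String) :
    (ids.foldl (fun d t => d.erase t) d).items
      = d.items.filter (fun p => !decide (p.1 ∈ ids)) := by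
  induction ids generalizing d with
  | nil => simp
  | cons t ids ih =>
    simp only [List.foldl_cons, ih]
    show (d.items.filter (fun p => !(p.1 == t))).filter (fun p => !decide (p.1 ∈ ids)) = _
    rw [List.filter_filter]
    apply List.filter_congr
    intro p _
    by_cases h1 : p.1 = t <;> by_cases h2 : p.1 ∈ ids <;> simp [h1, h2]

-- overwriting the key-k entry commutes with a filter that looks only at keys
theorem pv_filter_map_replace (P : String → Bool) (k v : String) (l : List (String × String)) :
    (l.map (fun p => if p.1 == k then (k, v) else p)).filter (fun p => !P p.1)
      = (l.filter (fun p => !P p.1)).map (fun p => if p.1 == k then (k, v) else p) := by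
  rw [List.filter_map]
  congr 1
  apply List.filter_congr
  intro p _
  by_cases h : p.1 = k
  · simp [Function.comp, h]
  · simp [Function.comp, h]

-- when key k is filtered out, overwriting the key-k entry is invisible
theorem pv_filter_map_replace_true (P : String → Bool) (k v : String) (hk : P k = true)
    (l : List (String × String)) :
    (l.map (fun p => if p.1 == k then (k, v) else p)).filter (fun p => !P p.1)
      = l.filter (fun p => !P p.1) := by
  rw [pv_filter_map_replace]
  have h : ∀ p ∈ l.filter (fun p => !P p.1), (if p.1 == k then (k, v) else p) = p := by
    intro p hp
    have hq := (List.mem_filter.mp hp).2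
    have hne : p.1 ≠ k := by
      intro hh; rw [hh, hk] at hq; exact absurd hq (by simp)
    simp [hne]
  calc (l.filter (fun p => !P p.1)).map (fun p => if p.1 == k then (k, v) else p)
      = (l.filter (fun p => !P p.1)).map id := List.map_congr_left h
    _ = l.filter (fun p => !P p.1) := List.map_id _

-- the filter keeps every key-k entry, so searching for k is unaffected
theorem pv_any_filter (P : String → Bool) (k : String) (hk : P k = false) (l : List (String × String)) :
    (l.filter (fun p => !P p.1)).any (fun p => p.1 == k) = l.any (fun p => p.1 == k) := by
  induction l with
  | nil => rfl
  | cons p l ih =>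
    by_cases h2 : P p.1
    · have hb : (p.1 == k) = false := by
        apply beq_eq_false_iff_ne.mpr
        intro hh; rw [hh, hk] at h2; exact absurd h2 (by simp)
      simp [h2, hb, ih]
    · simp [h2, ih]

-- filtering the items of an insert-fold is the insert-fold of the filtered list
theorem pv_filter_foldl_insert (P : String → Bool) (L : List (String × String)) (d : PySem.Dict String String) :
    (L.foldl (fun d p => d.insert p.1 p.2) d).items.filter (fun p => !P p.1)
      = ((L.filter (fun p => !P p.1)).foldl (fun d p => d.insert p.1 p.2)
          (PySem.Dict.mk (d.items.filter (fun p => !P p.1)))).items := by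
  induction L generalizing d with
  | nil => rfl
  | cons p L ih =>
    obtain ⟨k, v⟩ := p
    by_cases hP : P k
    · have hdrop : (d.insert k v).items.filter (fun p => !P p.1) = d.items.filter (fun p => !P p.1) := by
        unfold PySem.Dict.insert
        by_cases hc : d.contains k
        · simp only [hc, if_true]
          exact pv_filter_map_replace_true P k v hP d.items
        · simp only [hc, Bool.false_eq_true, if_false]
          simp [List.filter_append, hP]
      simp only [List.foldl_cons, List.filter_cons, hP, Bool.not_true, Bool.false_eq_true, if_false, ih, hdrop]
    · have hPk : P k = false := by simpa using hP
      have hmk : PySem.Dict.mk ((d.insert k v).items.filter (fun p => !P p.1))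
          = (PySem.Dict.mk (d.items.filter (fun p => !P p.1))).insert k v := by
        unfold PySem.Dict.insert
        have hcon : (PySem.Dict.mk (d.items.filter (fun p => !P p.1))).contains k = d.contains k := by
          show (d.items.filter (fun p => !P p.1)).any (fun p => p.1 == k) = d.items.any (fun p => p.1 == k)
          exact pv_any_filter P k hPk d.items
        by_cases hc : d.contains k
        · simp only [hcon, hc, if_true]
          exact congrArg PySem.Dict.mk (pv_filter_map_replace P k v d.items)
        · simp only [hcon, hc, Bool.false_eq_true, if_false]
          exact congrArg PySem.Dict.mk (by simp [List.filter_append, hPk])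
      simp only [List.foldl_cons, List.filter_cons, hPk, Bool.not_false, if_true, ih, hmk]

-- ===== VERDICT (by name: the statement is the Claim_ definition above) =====
theorem update_sales_spec : Claim_equal_update_sales := by
  intro ts rf _
  unfold Spec_update_sales update_sales update_sales_alt
  dsimp only
  rw [show (fun (d : PySem.Dict String String) line =>
      match d.pop? (pvTid line) with | some (_, d') => d' | none => d)
      = fun d line => d.erase (pvTid line) from funext fun d => funext fun line => pv_pop_step d (pvTid line)]
  have hB : List.foldl (fun (d : PySem.Dict String String) t => d.erase t) (PySem.Dict.ofList ts)
        ((PySem.List.slice rf (some 1)).map pvTid)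
      = List.foldl (fun d line => d.erase (pvTid line)) (PySem.Dict.ofList ts)
        (PySem.List.slice rf (some 1)) := by
    rw [List.foldl_map]
  rw [← hB]
  rw [pv_foldl_if_filter]
  have hP : (fun p : String × String =>
      !((PySem.List.slice rf (some 1)).foldl (fun d line => d.insert (pvTid line) true)
          (PySem.Dict.empty : PySem.Dict String Bool)).contains p.1)
      = (fun p : String × String => !decide (p.1 ∈ (PySem.List.slice rf (some 1)).map pvTid)) := by
    funext p
    rw [pv_contains_returns]
  rw [hP]
  rw [pv_foldl_erase_items ((PySem.List.slice rf (some 1)).map pvTid) (PySem.Dict.ofList ts)]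
  exact (pv_filter_foldl_insert
      (fun k => decide (k ∈ (PySem.List.slice rf (some 1)).map pvTid)) ts PySem.Dict.empty).symm
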